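-- pv_equiv track=rewrite | github.com/sasmi825/stock-indicators-etl | stockdata/indicators.py | get_subsequence_indices
-- ===== SOURCE A (Python) =====
-- def get_subsequence_indices(array):
--     """
--     Finds subsequences of 60, 120, or 180 in a given sequence.
--
--     Args:
--         array: A list of integers.
--
--     Returns:
--         A list of tuples, where each tuple contains the start and end indices of a subsequence.
--     """
--     subsequence_indices = []  # output
--     len_arr = len(array)  # length of array
--
--     start_index = 0
--     for idx in range(1, len_arr):
--         if array[idx] not in [60, 120, 180]:
--             end_index = idx
--             if end_index - start_index > 1:
--                 subsequence_indices.append((start_index, end_index))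
--             start_index = idx
--         if idx == len_arr - 1:
--             end_index = len_arr
--             if end_index - start_index > 1:
--                 subsequence_indices.append((start_index, end_index))
--
--     return subsequence_indices
-- ===== SOURCE B (Python) =====
-- def get_subsequence_indices(array):
--     """
--     Finds subsequences of 60, 120, or 180 in a given sequence.
--
--     Boundary-list decomposition: collect separator indices, pair consecutive
--     boundaries, keep spans longer than 1.
--     """
--     n = len(array)
--     seps = [i for i in range(1, n) if array[i] not in (60, 120, 180)]
--     bounds = [0] + seps + [n]
--     result = []
--     for s, e in zip(bounds, bounds[1:]):
--         if e - s > 1: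
--             result.append((s, e))
--     return result
-- ===== Notes on version B (the rewrite author's own statement) =====
-- stated objective: simpler
-- what changed: Replaces A's stateful single pass (mutable start_index plus a special last-iteration branch) with a stateless build-boundaries-then-pairwise-scan: collect separator indices, surround them with 0 and len(array), and emit every consecutive boundary pair whose span exceeds 1.
import Mathlib
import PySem

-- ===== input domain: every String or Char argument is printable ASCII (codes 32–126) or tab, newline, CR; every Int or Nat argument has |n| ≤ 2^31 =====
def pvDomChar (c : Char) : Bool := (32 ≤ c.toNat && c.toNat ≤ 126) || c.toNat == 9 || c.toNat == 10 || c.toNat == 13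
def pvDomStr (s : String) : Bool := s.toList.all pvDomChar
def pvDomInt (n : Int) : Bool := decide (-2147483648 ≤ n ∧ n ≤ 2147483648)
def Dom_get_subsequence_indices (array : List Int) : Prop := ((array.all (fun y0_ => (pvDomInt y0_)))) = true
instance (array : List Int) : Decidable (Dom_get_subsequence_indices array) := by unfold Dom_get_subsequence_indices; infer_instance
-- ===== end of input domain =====

-- B replaces A's stateful single pass with a boundary-list decomposition (collect
-- separators, pair consecutive boundaries); objective: simpler. Same O(n) cost.

-- shared predicate: array[i] not in [60, 120, 180] (index always in range in both loops)
def pvIsSep (array : List Int) (i : Int) : Bool :=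
  PySem.List.pyGetD array i 0 ∉ ([60, 120, 180] : List Int)

-- ===== PORT A =====
-- loop body of A's single pass: first the separator branch, then the last-index branch
def pvStepA (array : List Int) (len_arr : Int) (st : List (Int × Int) × Int) (idx : Int) :
    List (Int × Int) × Int :=
  let s1 :=
    if pvIsSep array idx then
      ((if idx - st.2 > 1 then st.1 ++ [(st.2, idx)] else st.1), idx)
    else st
  if idx = len_arr - 1 then
    ((if len_arr - s1.2 > 1 then s1.1 ++ [(s1.2, len_arr)] else s1.1), s1.2)
  else s1

def get_subsequence_indices (array : List Int) : List (Int × Int) :=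
  let len_arr : Int := array.length
  ((PySem.List.pyRange 1 len_arr 1).foldl (pvStepA array len_arr) ([], 0)).1

-- ===== PORT B =====
def get_subsequence_indices_alt (array : List Int) : List (Int × Int) :=
  let n : Int := array.length
  let seps := (PySem.List.pyRange 1 n 1).filter (pvIsSep array)
  let bounds := 0 :: (seps ++ [n])
  (bounds.zip (bounds.drop 1)).foldl
    (fun res se => if se.2 - se.1 > 1 then res ++ [se] else res) []

-- ===== PRECONDITION & SPEC =====
def Spec_get_subsequence_indices (array : List Int) (out : List (Int × Int)) : Prop := out = get_subsequence_indices_alt array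
instance (array : List Int) (out : List (Int × Int)) : Decidable (Spec_get_subsequence_indices array out) := by unfold Spec_get_subsequence_indices; infer_instance

-- ===== CLAIM (what is proved, stated in full; the proofs are below) =====
def Claim_equal_get_subsequence_indices : Prop := ∀ (array : List Int), Dom_get_subsequence_indices array → Spec_get_subsequence_indices array (get_subsequence_indices array)

-- ===== LEMMAS AND PROOFS =====

-- segments from a start boundary and the remaining boundary list
def pvEmit : Int → List Int → List (Int × Int)
  | _, [] => []
  | s, e :: rest => (if e - s > 1 then [(s, e)] else []) ++ pvEmit e rest

lemma pvZipFold (L : List Int) : ∀ (s : Int) (acc : List (Int × Int)),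
    (((s :: L).zip L).foldl
      (fun res se => if se.2 - se.1 > 1 then res ++ [se] else res) acc)
    = acc ++ pvEmit s L := by
  induction L with
  | nil => intro s acc; simp [pvEmit]
  | cons e rest ih =>
    intro s acc
    simp only [List.zip_cons_cons, List.foldl_cons]
    rw [ih e]
    by_cases h : e - s > 1 <;> simp [pvEmit, h]

lemma pvFoldA (array : List Int) (n : Int) :
    ∀ (m : Nat) (j start : Int) (out : List (Int × Int)),
    (n - 1 - j).toNat = m → 1 ≤ j → j ≤ n - 1 →
    ((PySem.List.pyRange j n 1).foldl (pvStepA array n) (out, start)).1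
      = out ++ pvEmit start ((PySem.List.pyRange j n 1).filter (pvIsSep array) ++ [n]) := by
  intro m
  induction m with
  | zero =>
    intro j start out hm h1 h2
    have hj : j = n - 1 := by omega
    subst hj
    rw [PySem.List.pyRange_one_cons (by omega : n - 1 < n),
        PySem.List.pyRange_one_eq_nil (by omega : n ≤ n - 1 + 1)]
    simp only [List.foldl_cons, List.foldl_nil, List.filter_cons, List.filter_nil]
    by_cases hs : pvIsSep array (n - 1)
    · simp only [pvStepA, hs, if_true]
      by_cases h3 : n - 1 - start > 1 <;>
        simp [pvEmit, h3]
    · simp only [pvStepA, hs, Bool.false_eq_true, if_false]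
      by_cases h3 : n - start > 1 <;> simp [pvEmit, h3]
  | succ m ih =>
    intro j start out hm h1 h2
    have hlt : j < n - 1 := by omega
    rw [PySem.List.pyRange_one_cons (by omega : j < n)]
    simp only [List.foldl_cons, List.filter_cons]
    have hne : ¬ (j = n - 1) := by omega
    by_cases hs : pvIsSep array j
    · simp only [pvStepA, hs, if_pos, if_neg hne]
      rw [ih (j+1) j (if j - start > 1 then out ++ [(start, j)] else out) (by omega) (by omega) (by omega)]
      by_cases h3 : j - start > 1 <;> simp [pvEmit, h3]
    · simp only [pvStepA, hs, Bool.false_eq_true, if_false, if_neg hne]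
      rw [ih (j+1) start out (by omega) (by omega) (by omega)]

-- ===== VERDICT (by name: the statement is the Claim_ definition above) =====
theorem get_subsequence_indices_spec : Claim_equal_get_subsequence_indices := by
  intro array _
  unfold Spec_get_subsequence_indices get_subsequence_indices get_subsequence_indices_alt
  simp only [List.drop_one, List.tail_cons]
  by_cases h2 : 2 ≤ (array.length : Int)
  · rw [pvFoldA array (array.length : Int) ((array.length : Int) - 1 - 1).toNat 1 0 []
        rfl (by omega) (by omega), pvZipFold]
  · have hl : (array.length : Int) ≤ 1 := by omega
    rw [PySem.List.pyRange_one_eq_nil hl, pvZipFold]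
    simp only [List.filter_nil, List.nil_append, List.foldl_nil]
    simp [pvEmit]
    omega
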